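-- pv_equiv track=rewrite | github.com/sarbeshtiwari/arc-agi-3 | environment_files/rd01/rd01.py | _tile_train
-- ===== SOURCE A (Python) =====
-- def _make_tile(color, size):
--     return [[color] * size for _ in range(size)]
--
-- def _tile_train(bg, train_c, size):
--     t = _make_tile(bg, size)
--     if size >= 4:
--         for r in range(1, size - 1):
--             for c in range(1, size - 1):
--                 t[r][c] = train_c
--     elif size >= 2:
--         for r in range(size):
--             for c in range(size):
--                 t[r][c] = train_c
--     return t
-- ===== SOURCE B (Python) =====
-- def _tile_train(bg, train_c, size):
--     if size < 2:
--         return [[bg] * size for _ in range(size)]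
--     if size < 4:
--         return [[train_c] * size for _ in range(size)]
--     border = [bg] * size
--     inner = [bg] + [train_c] * (size - 2) + [bg]
--     return [list(border) if r == 0 or r == size - 1 else list(inner) for r in range(size)]
-- ===== Notes on version B (the rewrite author's own statement) =====
-- stated objective: alternative
-- what changed: A allocates an all-bg grid and then mutates the coloured region cell by cell with nested index-assignment loops; B classifies rows (border vs inner, or all-bg / all-colour for small sizes), builds each distinct row shape once by list repetition/concatenation, and emits a copy of the right shape per row, with no per-cell loops and no mutation.
import Mathlib
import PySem

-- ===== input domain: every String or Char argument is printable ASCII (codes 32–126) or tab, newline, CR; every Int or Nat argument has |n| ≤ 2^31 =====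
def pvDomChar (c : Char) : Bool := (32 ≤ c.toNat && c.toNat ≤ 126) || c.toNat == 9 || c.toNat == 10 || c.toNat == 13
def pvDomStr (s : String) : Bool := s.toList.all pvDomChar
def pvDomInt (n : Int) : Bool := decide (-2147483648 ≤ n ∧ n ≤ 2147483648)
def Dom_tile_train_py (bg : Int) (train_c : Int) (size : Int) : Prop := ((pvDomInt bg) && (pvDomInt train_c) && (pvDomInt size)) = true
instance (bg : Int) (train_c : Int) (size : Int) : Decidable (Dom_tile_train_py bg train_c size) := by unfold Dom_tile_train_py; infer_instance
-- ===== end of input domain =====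

-- B replaces A's fill-everything-then-overwrite-a-region build with a row taxonomy:
-- the (at most two) distinct row shapes are built once by list repetition/concatenation
-- and each output row is a copy of the right shape (objective: alternative decomposition,
-- no per-cell mutation).

-- ===== PORT A =====
-- _make_tile(color, size) = [[color] * size for _ in range(size)]
def make_tile_py (color : Int) (size : Int) : List (List Int) :=
  (PySem.List.pyRange 0 size 1).map (fun _ => List.replicate size.toNat color)

-- literal port of _tile_train: build bg tile, then overwrite a region in place
-- (t[r][c] = train_c  ↦  modify row r.toNat, set column c.toNat)
def tile_train_py (bg : Int) (train_c : Int) (size : Int) : List (List Int) :=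
  let t := make_tile_py bg size
  if size ≥ 4 then
    (PySem.List.pyRange 1 (size - 1) 1).foldl (fun t r =>
      (PySem.List.pyRange 1 (size - 1) 1).foldl (fun t c =>
        t.modify r.toNat (fun row => row.set c.toNat train_c)) t) t
  else if size ≥ 2 then
    (PySem.List.pyRange 0 size 1).foldl (fun t r =>
      (PySem.List.pyRange 0 size 1).foldl (fun t c =>
        t.modify r.toNat (fun row => row.set c.toNat train_c)) t) t
  else t

-- ===== PORT B =====
-- row taxonomy: border and inner row shapes built once, each output row picks one
-- (Python's 'list(border)' / 'list(inner)' copies are value-identity here: lists are immutable)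
def tile_train_py_alt (bg : Int) (train_c : Int) (size : Int) : List (List Int) :=
  if size < 2 then (PySem.List.pyRange 0 size 1).map (fun _ => List.replicate size.toNat bg)
  else if size < 4 then (PySem.List.pyRange 0 size 1).map (fun _ => List.replicate size.toNat train_c)
  else
    let border := List.replicate size.toNat bg
    let inner := [bg] ++ List.replicate (size - 2).toNat train_c ++ [bg]
    (PySem.List.pyRange 0 size 1).map (fun r => if r = 0 ∨ r = size - 1 then border else inner)

-- ===== PRECONDITION & SPEC =====
def Spec_tile_train_py (bg : Int) (train_c : Int) (size : Int) (out : List (List Int)) : Prop := out = tile_train_py_alt bg train_c size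
instance (bg : Int) (train_c : Int) (size : Int) (out : List (List Int)) : Decidable (Spec_tile_train_py bg train_c size out) := by unfold Spec_tile_train_py; infer_instance

-- ===== CLAIM (what is proved, stated in full; the proofs are below) =====
def Claim_equal_tile_train_py : Prop := ∀ (bg : Int) (train_c : Int) (size : Int), Dom_tile_train_py bg train_c size → Spec_tile_train_py bg train_c size (tile_train_py bg train_c size)

-- ===== LEMMAS AND PROOFS =====

-- the inner column loop on a fixed row r commutes out of the modify
lemma inner_modify_comm (v : Int) (L : List Int) :
    ∀ (t : List (List Int)) (r : Nat),
      L.foldl (fun t c => t.modify r (fun row => row.set c.toNat v)) t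
        = t.modify r (fun row => L.foldl (fun l c => l.set c.toNat v) row) := by
  induction L with
  | nil =>
      intro t r
      simp only [List.foldl_nil]
      rw [show (fun (row : List Int) => row) = id from rfl, List.modify_id]
  | cons c L ih =>
      intro t r
      simp only [List.foldl_cons, ih, List.modify_modify_eq]
      rfl

-- pointwise value of a fold that sets columns a..b-1 of a row to v
lemma setfold_getElem? (v : Int) :
    ∀ (n : Nat) (a b : Int), (b - a).toNat = n → 0 ≤ a →
      ∀ (row : List Int) (j : Nat),
        ((PySem.List.pyRange a b 1).foldl (fun l c => l.set c.toNat v) row)[j]?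
          = if a ≤ (j : Int) ∧ (j : Int) < b ∧ j < row.length then some v else row[j]? := by
  intro n
  induction n with
  | zero =>
      intro a b hn ha row j
      rw [PySem.List.pyRange_one_eq_nil (by omega)]
      simp only [List.foldl_nil]
      split_ifs with h
      · omega
      · rfl
  | succ m ih =>
      intro a b hn ha row j
      have hab : a < b := by omega
      rw [PySem.List.pyRange_one_cons hab]
      simp only [List.foldl_cons]
      rw [ih (a + 1) b (by omega) (by omega)]
      simp only [List.length_set, List.getElem?_set]
      split_ifs <;>
        first
          | rfl
          | omega
          | (exact (List.getElem?_eq_none (by omega)).symm)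

-- pointwise value of a fold that modifies rows a..b-1 of the grid with f
lemma modfold_getElem? (f : List Int → List Int) :
    ∀ (n : Nat) (a b : Int), (b - a).toNat = n → 0 ≤ a →
      ∀ (t : List (List Int)) (i : Nat),
        ((PySem.List.pyRange a b 1).foldl (fun t r => t.modify r.toNat f) t)[i]?
          = if a ≤ (i : Int) ∧ (i : Int) < b then t[i]?.map f else t[i]? := by
  intro n
  induction n with
  | zero =>
      intro a b hn ha t i
      rw [PySem.List.pyRange_one_eq_nil (by omega)]
      simp only [List.foldl_nil]
      split_ifs with h
      · omega
      · rfl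
  | succ m ih =>
      intro a b hn ha t i
      have hab : a < b := by omega
      rw [PySem.List.pyRange_one_cons hab]
      simp only [List.foldl_cons]
      rw [ih (a + 1) b (by omega) (by omega)]
      rw [List.getElem?_modify]
      rcases t[i]? with _ | row
      · simp
      · simp only [Option.map]
        split_ifs <;> first | rfl | omega

lemma getElem?_make_tile (color size : Int) (i : Nat) :
    (make_tile_py color size)[i]? =
      if i < size.toNat then some (List.replicate size.toNat color) else none := by
  unfold make_tile_py
  rw [List.getElem?_map, PySem.List.getElem?_pyRange_one]
  split_ifs with h h' <;> first | rfl | omega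

-- pointwise description of B's inner row shape [bg] ++ v*m ++ [bg]
lemma inner_getElem? (bg v : Int) (m : Nat) (j : Nat) :
    ([bg] ++ List.replicate m v ++ [bg])[j]?
      = if j = 0 then some bg
        else if j < m + 1 then some v
        else if j = m + 1 then some bg else none := by
  rw [show [bg] ++ List.replicate m v ++ [bg]
        = bg :: (List.replicate m v ++ [bg]) from rfl, List.getElem?_cons]
  by_cases hj0 : j = 0
  · simp [hj0]
  · rw [if_neg hj0, if_neg hj0]
    by_cases hjm : j - 1 < m
    · rw [List.getElem?_append_left (by simpa using hjm), List.getElem?_replicate,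
          if_pos hjm, if_pos (by omega)]
    · rw [if_neg (by omega), List.getElem?_append_right (by simpa using hjm)]
      simp only [List.length_replicate]
      by_cases hje : j = m + 1
      · rw [if_pos hje, show j - 1 - m = 0 from by omega]
        rfl
      · rw [if_neg hje]
        exact List.getElem?_eq_none (by simp; omega)

-- the interior row of A's size ≥ 4 case is B's inner row shape
lemma setfold_inner (bg v size : Int) (h4 : 4 ≤ size) :
    (PySem.List.pyRange 1 (size - 1) 1).foldl (fun l c => l.set c.toNat v)
        (List.replicate size.toNat bg)
      = [bg] ++ List.replicate (size - 2).toNat v ++ [bg] := by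
  apply List.ext_getElem?
  intro j
  rw [setfold_getElem? v (size - 1 - 1).toNat 1 (size - 1) rfl (by omega)]
  rw [inner_getElem?]
  simp only [List.length_replicate, List.getElem?_replicate]
  split_ifs <;> first | rfl | omega

-- the size ∈ {2, 3} case: setting every column turns a bg row into a v row
lemma setfold_full (bg v size : Int) (h2 : 2 ≤ size) :
    (PySem.List.pyRange 0 size 1).foldl (fun l c => l.set c.toNat v)
        (List.replicate size.toNat bg)
      = List.replicate size.toNat v := by
  apply List.ext_getElem?
  intro j
  rw [setfold_getElem? v (size - 0).toNat 0 size rfl le_rfl]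
  simp only [List.length_replicate, List.getElem?_replicate]
  split_ifs <;> first | rfl | omega

lemma claim_proof : ∀ (bg : Int) (train_c : Int) (size : Int),
    tile_train_py bg train_c size = tile_train_py_alt bg train_c size := by
  intro bg train_c size
  unfold tile_train_py tile_train_py_alt
  by_cases h4 : size ≥ 4
  · rw [if_pos h4, if_neg (by omega), if_neg (by omega)]
    apply List.ext_getElem?
    intro i
    rw [show (fun (t : List (List Int)) (r : Int) =>
          (PySem.List.pyRange 1 (size - 1) 1).foldl (fun t c =>
            t.modify r.toNat (fun row => row.set c.toNat train_c)) t)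
        = (fun t r => t.modify r.toNat (fun row =>
            (PySem.List.pyRange 1 (size - 1) 1).foldl (fun l c => l.set c.toNat train_c) row))
        from funext fun t => funext fun r => inner_modify_comm train_c _ t r.toNat]
    rw [modfold_getElem? _ (size - 1 - 1).toNat 1 (size - 1) rfl (by omega)]
    rw [getElem?_make_tile, List.getElem?_map, PySem.List.getElem?_pyRange_one]
    simp only [Int.sub_zero, Int.zero_add]
    by_cases hi : i < size.toNat
    · rw [if_pos hi, if_pos hi]
      simp only [Option.map_some]
      by_cases hint : 1 ≤ (i : Int) ∧ (i : Int) < size - 1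
      · rw [if_pos hint, if_neg (by omega)]
        rw [setfold_inner bg train_c size (by omega)]
      · rw [if_neg hint, if_pos (by omega)]
    · rw [if_neg hi, if_neg hi]
      simp
  · by_cases h2 : size ≥ 2
    · rw [if_neg h4, if_pos h2, if_neg (by omega), if_pos (by omega)]
      apply List.ext_getElem?
      intro i
      rw [show (fun (t : List (List Int)) (r : Int) =>
            (PySem.List.pyRange 0 size 1).foldl (fun t c =>
              t.modify r.toNat (fun row => row.set c.toNat train_c)) t)
          = (fun t r => t.modify r.toNat (fun row =>
              (PySem.List.pyRange 0 size 1).foldl (fun l c => l.set c.toNat train_c) row))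
          from funext fun t => funext fun r => inner_modify_comm train_c _ t r.toNat]
      rw [modfold_getElem? _ (size - 0).toNat 0 size rfl le_rfl]
      rw [getElem?_make_tile, List.getElem?_map, PySem.List.getElem?_pyRange_one]
      simp only [Int.sub_zero]
      by_cases hi : i < size.toNat
      · rw [if_pos hi, if_pos hi, if_pos (⟨by omega, by omega⟩ : 0 ≤ (i : Int) ∧ (i : Int) < size)]
        simp only [Option.map_some]
        rw [setfold_full bg train_c size h2]
      · rw [if_neg hi, if_neg hi]
        simp
    · rw [if_neg h4, if_neg h2, if_pos (by omega)]
      rfl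

-- ===== VERDICT (by name: the statement is the Claim_ definition above) =====
theorem tile_train_py_spec : Claim_equal_tile_train_py := by
  intro bg train_c size _
  unfold Spec_tile_train_py
  exact claim_proof bg train_c size
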